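-- pv_equiv track=rewrite | github.com/DarkDragoon2002/UBSGlobalCodingChallenge2025 | routes/safeguard.py | inv_double_consonants
-- ===== SOURCE A (Python) =====
-- VOWELS = set("aeiouAEIOU")
--
-- def is_letter(ch):
--     return ("A" <= ch <= "Z") or ("a" <= ch <= "z")
--
-- def is_consonant(ch):
--     return is_letter(ch) and ch not in VOWELS
--
-- def inv_double_consonants(s: str) -> str:
--     # Undo doubling: collapse pairs of identical consonants
--     def inv_word(w):
--         out = []
--         i = 0
--         while i < len(w):
--             ch = w[i]
--             if i + 1 < len(w) and ch == w[i + 1] and is_consonant(ch):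
--                 out.append(ch)
--                 i += 2
--             else:
--                 out.append(ch)
--                 i += 1
--         return "".join(out)
--     return " ".join(inv_word(w) for w in s.split(" "))
-- ===== SOURCE B (Python) =====
-- VOWELS = set("aeiouAEIOU")
--
-- def is_letter(ch):
--     return ("A" <= ch <= "Z") or ("a" <= ch <= "z")
--
-- def is_consonant(ch):
--     return is_letter(ch) and ch not in VOWELS
--
-- def inv_double_consonants(s: str) -> str:
--     # Run-length strategy: split each word into maximal runs of one character;
--     # a run of L identical consonants came from doubling ceil(L/2) of them.
--     def inv_word(w):
--         out = []
--         i = 0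
--         n = len(w)
--         while i < n:
--             j = i
--             while j < n and w[j] == w[i]:
--                 j += 1
--             L = j - i
--             out.append(w[i] * ((L + 1) // 2 if is_consonant(w[i]) else L))
--             i = j
--         return "".join(out)
--     return " ".join(inv_word(w) for w in s.split(" "))
-- ===== Notes on version B (the rewrite author's own statement) =====
-- stated objective: alternative
-- what changed: inv_word's index scan that compares w[i] with w[i+1] and skips 2 on a doubled consonant is replaced by a run-length pass: each maximal run of L identical characters is emitted as one ch*count string, ceil(L/2) copies if a consonant, L otherwise.
import Mathlib
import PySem

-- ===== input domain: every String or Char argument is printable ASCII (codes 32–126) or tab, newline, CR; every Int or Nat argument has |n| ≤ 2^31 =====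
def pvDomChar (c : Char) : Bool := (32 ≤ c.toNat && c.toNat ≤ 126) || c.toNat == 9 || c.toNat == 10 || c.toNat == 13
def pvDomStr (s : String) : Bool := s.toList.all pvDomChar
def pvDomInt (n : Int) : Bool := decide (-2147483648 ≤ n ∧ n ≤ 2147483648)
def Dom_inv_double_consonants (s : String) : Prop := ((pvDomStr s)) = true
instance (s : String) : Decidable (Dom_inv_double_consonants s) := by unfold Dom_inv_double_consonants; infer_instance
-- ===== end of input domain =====

-- B replaces A's pairwise index-skipping scan by a run-length pass (each maximal
-- run of L identical consonants shrinks to ceil(L/2)); objective: alternative.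

-- shared module-level helpers (identical in Source A and Source B)
def pvVowels : List Char := "aeiouAEIOU".toList

def pvIsLetter (ch : Char) : Bool := ('A' ≤ ch && ch ≤ 'Z') || ('a' ≤ ch && ch ≤ 'z')

def pvIsConsonant (ch : Char) : Bool := pvIsLetter ch && !(pvVowels.contains ch)

-- ===== PORT A =====
-- A's inner while-loop: look at w[i] and w[i+1], skip 2 on a doubled consonant, else 1.
def pvInvWordA : List Char → List Char
  | [] => []
  | [c] => [c]
  | c :: d :: rest =>
    if c == d && pvIsConsonant c then c :: pvInvWordA rest
    else c :: pvInvWordA (d :: rest)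

def inv_double_consonants (s : String) : String :=
  String.ofList (PySem.Chars.join [' ']
    ((PySem.Chars.splitOn s.toList [' ']).map pvInvWordA))

-- ===== PORT B =====
-- B's inner loop: scan the maximal run of w[i] (the inner `while j < n` scan =
-- takeWhile/dropWhile), emit w[i] repeated ceil(L/2) (consonant) or L times.
def pvInvWordB : List Char → List Char
  | [] => []
  | c :: rest =>
    let run := rest.takeWhile (· == c)
    List.replicate (if pvIsConsonant c then (run.length + 2) / 2 else run.length + 1) c
      ++ pvInvWordB (rest.dropWhile (· == c))
termination_by w => w.length
decreasing_by
  simpa using Nat.lt_succ_of_le (List.length_dropWhile_le _ _)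

def inv_double_consonants_alt (s : String) : String :=
  String.ofList (PySem.Chars.join [' ']
    ((PySem.Chars.splitOn s.toList [' ']).map pvInvWordB))

-- ===== PRECONDITION & SPEC =====
def Spec_inv_double_consonants (s : String) (out : String) : Prop := out = inv_double_consonants_alt s
instance (s : String) (out : String) : Decidable (Spec_inv_double_consonants s out) := by unfold Spec_inv_double_consonants; infer_instance

-- ===== CLAIM (what is proved, stated in full; the proofs are below) =====
def Claim_equal_inv_double_consonants : Prop := ∀ (s : String), Dom_inv_double_consonants s → Spec_inv_double_consonants s (inv_double_consonants s)

-- ===== LEMMAS AND PROOFS =====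

-- one-step unfolding of A's scan when the next char differs (or is missing / not a doubled consonant)
theorem pvInvWordA_cons_ne (c d : Char) (r : List Char) (h : d ≠ c) :
    pvInvWordA (c :: d :: r) = c :: pvInvWordA (d :: r) := by
  rw [pvInvWordA]
  rw [if_neg]
  simp only [Bool.and_eq_true, beq_iff_eq, not_and]
  intro hcd
  exact absurd hcd.symm h

-- A's scan on a block `replicate n c ++ r` (r not starting with c) produces
-- ceil(n/2) copies of a consonant c, n copies otherwise, then continues on r.
theorem pvInvWordA_run (c : Char) :
    ∀ n (r : List Char), (∀ d, r.head? = some d → d ≠ c) →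
      pvInvWordA (List.replicate n c ++ r) =
        List.replicate (if pvIsConsonant c then (n + 1) / 2 else n) c ++ pvInvWordA r := by
  intro n
  induction n using Nat.strong_induction_on with
  | _ n ih =>
    intro r hr
    match n with
    | 0 => simp
    | 1 =>
      have hone : (if pvIsConsonant c then (1 + 1) / 2 else 1) = 1 := by split <;> rfl
      rw [hone]
      simp only [List.replicate, List.singleton_append]
      match r with
      | [] => rfl
      | d :: r' => exact pvInvWordA_cons_ne c d r' (hr d rfl)
    | (m + 2) =>
      have hsplit : List.replicate (m + 2) c ++ r = c :: c :: (List.replicate m c ++ r) := by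
        simp [List.replicate]
      by_cases hc : pvIsConsonant c = true
      · rw [hsplit, pvInvWordA]
        rw [if_pos (by simp [hc])]
        rw [ih m (by omega) r hr]
        simp only [hc, if_true]
        have harith : (m + 2 + 1) / 2 = (m + 1) / 2 + 1 := by omega
        rw [harith, List.replicate_succ, List.cons_append]
      · have hcf : pvIsConsonant c = false := by simpa using hc
        rw [hsplit, pvInvWordA]
        rw [if_neg (by simp [hcf])]
        have h1 : c :: (List.replicate m c ++ r) = List.replicate (m + 1) c ++ r := by
          simp [List.replicate]
        rw [h1, ih (m + 1) (by omega) r hr]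
        simp [hcf, List.replicate_succ]

-- the maximal run taken by takeWhile (· == c) is literally a replicate of c
theorem pvTakeWhile_replicate (c : Char) (l : List Char) :
    l.takeWhile (· == c) = List.replicate (l.takeWhile (· == c)).length c := by
  induction l with
  | nil => simp
  | cons d t ih =>
    by_cases h : d = c
    · subst h
      rw [List.takeWhile_cons_of_pos (by simp)]
      rw [List.length_cons, List.replicate_succ]
      exact congrArg _ ih
    · rw [List.takeWhile_cons_of_neg (by simp [h])]
      simp

theorem pvInvWord_eq_aux : ∀ n (w : List Char), w.length ≤ n → pvInvWordA w = pvInvWordB w := by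
  intro n
  induction n with
  | zero =>
    intro w hw
    have hnil : w = [] := by
      cases w with
      | nil => rfl
      | cons a t => simp at hw
    subst hnil
    rw [pvInvWordB]
    rfl
  | succ n ih =>
    intro w hw
    match w with
    | [] => rw [pvInvWordB]; rfl
    | c :: rest =>
      have hsplit : c :: rest =
          List.replicate ((rest.takeWhile (· == c)).length + 1) c ++ rest.dropWhile (· == c) := by
        rw [List.replicate_succ, List.cons_append]
        congr 1
        conv_lhs => rw [← List.takeWhile_append_dropWhile (p := (· == c)) (l := rest)]
        congr 1
        exact pvTakeWhile_replicate c rest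
      have hhead : ∀ d, (rest.dropWhile (· == c)).head? = some d → d ≠ c := by
        intro d hdh
        have := List.head?_dropWhile_not (· == c) rest
        rw [hdh] at this
        simpa using this
      have hlen : (rest.dropWhile (· == c)).length ≤ n := by
        have h1 := List.length_dropWhile_le (· == c) rest
        have h2 : rest.length ≤ n := by simpa using Nat.succ_le_succ_iff.mp hw
        omega
      calc pvInvWordA (c :: rest)
          = pvInvWordA (List.replicate ((rest.takeWhile (· == c)).length + 1) c
              ++ rest.dropWhile (· == c)) := by rw [← hsplit]
        _ = List.replicate (if pvIsConsonant c
                then ((rest.takeWhile (· == c)).length + 1 + 1) / 2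
                else (rest.takeWhile (· == c)).length + 1) c
              ++ pvInvWordA (rest.dropWhile (· == c)) :=
            pvInvWordA_run c _ _ hhead
        _ = pvInvWordB (c :: rest) := by
            rw [ih _ hlen, pvInvWordB]

theorem pvInvWord_eq : pvInvWordA = pvInvWordB :=
  funext fun w => pvInvWord_eq_aux w.length w le_rfl

-- ===== VERDICT (by name: the statement is the Claim_ definition above) =====
theorem inv_double_consonants_spec : Claim_equal_inv_double_consonants := by
  intro s _
  unfold Spec_inv_double_consonants inv_double_consonants inv_double_consonants_alt
  rw [pvInvWord_eq]
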